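-- pv_equiv track=rewrite | github.com/Liz0001/LeetCode_Python | 1329_Sort_the_Matrix_Diagonally.py | diagonalSort
-- ===== SOURCE A (Python) =====
-- from typing import List
--
-- def diagonalSort(mat: List[List[int]]) -> List[List[int]]:
--     d = {}
--     for z in range(0,(len(mat)+len(mat[0]))-1):
--         d[z] = []
--
--     r = 0
--     for k in range(len(mat)-1, -1, -1):
--         for l in range(0, len(mat[0])):
--             d[r].append(mat[k][l])
--             d[r].sort()
--             r+=1
--         r -= len(mat[0])-1
--
--     q = 0
--     for k in range(len(mat)-1, -1, -1):
--         for l in range(0, len(mat[0])):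
--             mat[k][l] = d[q].pop(-1)
--             q+=1
--         q -= len(mat[0])-1
--
--     return mat
-- ===== SOURCE B (Python) =====
-- def diagonalSort(mat):
--     # Collect each diagonal (key i-j) once, sort it once, write back in place:
--     # the cell (i, j) is the min(i, j)-th element of its sorted diagonal.
--     n = len(mat[0])
--     diags = {}
--     for i, row in enumerate(mat):
--         for j in range(n):
--             diags.setdefault(i - j, []).append(row[j])
--     for k in diags:
--         diags[k] = sorted(diags[k])
--     for i, row in enumerate(mat):
--         for j in range(n):
--             row[j] = diags[i - j][min(i, j)]
--     return mat
-- ===== Notes on version B (the rewrite author's own statement) =====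
-- stated objective: faster
-- what changed: A re-sorts a diagonal's list after every single append and pops elements back out through a second stateful counter sweep; B collects each diagonal once into a dict keyed by i-j, sorts every diagonal exactly once, and writes each cell back by direct index min(i,j) into its sorted diagonal.
import Mathlib
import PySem

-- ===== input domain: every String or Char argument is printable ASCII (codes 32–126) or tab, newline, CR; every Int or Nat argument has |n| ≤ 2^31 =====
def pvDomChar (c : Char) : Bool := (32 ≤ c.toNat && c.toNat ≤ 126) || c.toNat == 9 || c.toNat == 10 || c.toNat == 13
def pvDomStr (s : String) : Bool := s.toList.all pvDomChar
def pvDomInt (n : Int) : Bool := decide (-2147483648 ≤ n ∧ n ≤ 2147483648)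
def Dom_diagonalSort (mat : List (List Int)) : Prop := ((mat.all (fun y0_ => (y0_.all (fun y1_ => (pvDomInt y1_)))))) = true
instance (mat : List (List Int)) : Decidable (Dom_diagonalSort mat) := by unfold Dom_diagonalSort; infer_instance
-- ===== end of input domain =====

-- ===== PORT A =====
-- Port of A (transliteration): a dict of per-key lists re-sorted after every
-- append, then a second counter sweep popping the largest element back into
-- the matrix bottom row first. (Both Pythons mutate `mat` in place and return
-- it; the equivalence proved here is about the returned value.)
def diagonalSort (mat : List (List Int)) : List (List Int) :=
  let m : Int := mat.length
  let n : Int := (PySem.List.pyGetD mat 0 []).length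
  let d : PySem.Dict Int (List Int) :=
    (PySem.List.pyRange 0 ((m + n) - 1) 1).foldl
      (fun d z => d.insert z ([] : List Int)) PySem.Dict.empty
  let s1 : PySem.Dict Int (List Int) × Int :=
    (PySem.List.pyRange (m - 1) (-1) (-1)).foldl
      (fun s k =>
        let s := (PySem.List.pyRange 0 n 1).foldl
          (fun (s : PySem.Dict Int (List Int) × Int) l =>
            let d := s.1.modify s.2 [] (fun t => t ++ [PySem.List.pyGetD (PySem.List.pyGetD mat k []) l 0])
            let d := d.modify s.2 [] (fun t => PySem.List.sorted t (fun x => x))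
            (d, s.2 + 1)) s
        (s.1, s.2 - (n - 1))) (d, 0)
  let s2 : List (List Int) × PySem.Dict Int (List Int) × Int :=
    (PySem.List.pyRange (m - 1) (-1) (-1)).foldl
      (fun s k =>
        let s := (PySem.List.pyRange 0 n 1).foldl
          (fun (s : List (List Int) × PySem.Dict Int (List Int) × Int) l =>
            let pr := (PySem.List.pop? (s.2.1.getD s.2.2 []) (-1)).getD (0, [])
            (PySem.List.pySetD s.1 k (PySem.List.pySetD (PySem.List.pyGetD s.1 k []) l pr.1),
             s.2.1.insert s.2.2 pr.2, s.2.2 + 1)) s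
        (s.1, s.2.1, s.2.2 - (n - 1))) (mat, s1.1, 0)
  s2.1

-- ===== PORT B =====
-- Port of B: group the diagonals once (key i-j), sort each diagonal once,
-- write cell (i, j) back as element min(i, j) of its sorted diagonal.
def diagonalSort_alt (mat : List (List Int)) : List (List Int) :=
  let n : Int := (PySem.List.pyGetD mat 0 []).length
  let diags : PySem.Dict Int (List Int) :=
    (PySem.List.enumerate mat 0).foldl
      (fun d p => (PySem.List.pyRange 0 n 1).foldl
        (fun d j => d.modify (p.1 - j) [] (fun t => t ++ [PySem.List.pyGetD p.2 j 0])) d)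
      PySem.Dict.empty
  let diags : PySem.Dict Int (List Int) :=
    diags.keys.foldl (fun d k => d.insert k (PySem.List.sorted (d.getD k []) (fun x => x))) diags
  (PySem.List.enumerate mat 0).map
    (fun p => (PySem.List.pyRange 0 n 1).foldl
      (fun row j => PySem.List.pySetD row j
        (PySem.List.pyGetD (diags.getD (p.1 - j) []) (min p.1 j) 0)) p.2)

-- ===== PRECONDITION & SPEC =====
-- Pre_ is exactly the set of inputs on which the Python A returns: A raises
-- IndexError on an empty matrix (mat[0]) and whenever some row is shorter
-- than row 0 (it reads mat[k][l] for every l < len(mat[0])).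
def Pre_diagonalSort (mat : List (List Int)) : Prop :=
  mat ≠ [] ∧ ∀ row ∈ mat, (mat.headD []).length ≤ row.length
instance (mat : List (List Int)) : Decidable (Pre_diagonalSort mat) := by
  unfold Pre_diagonalSort; infer_instance
def pvWitness_diagonalSort : List (List Int) := [[3, 1], [2, 0]]
def Spec_diagonalSort (mat : List (List Int)) (out : List (List Int)) : Prop := out = diagonalSort_alt mat
instance (mat : List (List Int)) (out : List (List Int)) : Decidable (Spec_diagonalSort mat out) := by
  unfold Spec_diagonalSort; infer_instance

-- ===== CLAIM (what is proved, stated in full; the proofs are below) =====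
def Claim_equal_diagonalSort : Prop := ∀ (mat : List (List Int)), Dom_diagonalSort mat → Pre_diagonalSort mat → Spec_diagonalSort mat (diagonalSort mat)

-- ===== LEMMAS AND PROOFS =====

def pvCtb (n0 : Nat) (i0 c : Int) (row : List Int) : List Int :=
  if 0 ≤ i0 - c ∧ i0 - c < (n0 : Int) then [PySem.List.pyGetD row (i0 - c) 0] else []

def pvDg (n0 : Nat) : List (List Int) → Int → Int → List Int
  | [], _, _ => []
  | row :: rest, i0, c => pvCtb n0 i0 c row ++ pvDg n0 rest (i0 + 1) c

def pvS (mat : List (List Int)) (n0 : Nat) (c : Int) : List Int :=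
  PySem.List.sorted (pvDg n0 mat 0 c) (fun x => x)

def pvW (mat : List (List Int)) (n0 : Nat) (i : Int) (l : Nat) : Int :=
  PySem.List.pyGetD (pvS mat n0 (i - (l : Int))) (min i (l : Int)) 0

-- generic: range-map-filter picks the single hit  (B shape: key i - j)
theorem pvRF_B (n0 : Nat) (s c : Int) (row : List Int) :
    (((PySem.List.pyRange 0 (n0 : Int) 1).map (fun j => (s - j, PySem.List.pyGetD row j 0))).filter
        (fun p => p.1 == c)).map (fun p => p.2) = pvCtb n0 s c row := by
  induction n0 with
  | zero => simp [pvCtb]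
  | succ t ih =>
    have h1 : ((t + 1 : Nat) : Int) = (t : Int) + 1 := by push_cast; ring
    rw [h1, PySem.List.pyRange_one_succ_right (by positivity)]
    simp only [List.map_append, List.filter_append, List.map_append, ih]
    by_cases hc : s - (t : Int) = c
    · have h0 : pvCtb t s c row = [] := by
        rw [pvCtb, if_neg (by omega : ¬ (0 ≤ s - c ∧ s - c < (t:Int)))]
      rw [h0]
      subst hc
      have h2 : pvCtb (t+1) s (s - (t:Int)) row = [PySem.List.pyGetD row ((t:Int)) 0] := by
        rw [pvCtb, if_pos (by push_cast; omega), show s - (s - (t:Int)) = (t:Int) by ring]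
      rw [h2]
      simp
    · have h0 : pvCtb (t+1) s c row = pvCtb t s c row := by
        unfold pvCtb
        by_cases h2 : 0 ≤ s - c ∧ s - c < (t:Int)
        · rw [if_pos (by push_cast; omega), if_pos h2]
        · rw [if_neg (by push_cast; omega), if_neg h2]
      rw [h0]
      simp [hc]

-- A shape: key r0 + j
def pvRowPairsA (row : List Int) (r0 : Int) (t : Nat) : List (Int × Int) :=
  (List.range t).map (fun (j : Nat) => (r0 + (j : Int), PySem.List.pyGetD row (j : Int) 0))

theorem pvRF_A (n0 : Nat) (r0 z : Int) (row : List Int) :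
    ((pvRowPairsA row r0 n0).filter
        (fun p => p.1 == z)).map (fun p => p.2) =
      if 0 ≤ z - r0 ∧ z - r0 < (n0 : Int) then [PySem.List.pyGetD row (z - r0) 0] else [] := by
  induction n0 with
  | zero => simp [pvRowPairsA]
  | succ t ih =>
    rw [show pvRowPairsA row r0 (t+1) = pvRowPairsA row r0 t
          ++ [(r0 + (t:Int), PySem.List.pyGetD row (t:Int) 0)] by
        rw [pvRowPairsA, List.range_succ, List.map_append]; rfl]
    rw [List.filter_append, List.map_append, ih]
    by_cases hc : r0 + (t : Int) = z
    · rw [if_neg (by omega : ¬ (0 ≤ z - r0 ∧ z - r0 < (t:Int))),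
        if_pos (by push_cast; omega : 0 ≤ z - r0 ∧ z - r0 < ((t+1 : Nat) : Int))]
      have h1 : z - r0 = (t : Int) := by omega
      rw [h1]
      simp [hc]
    · rw [show List.filter (fun p => p.1 == z) [(r0 + (t:Int), PySem.List.pyGetD row (t:Int) 0)] = [] by
          simp [hc]]
      by_cases h2 : 0 ≤ z - r0 ∧ z - r0 < (t:Int)
      · rw [if_pos h2, if_pos (by push_cast; omega : 0 ≤ z - r0 ∧ z - r0 < ((t+1 : Nat) : Int))]
        simp
      · rw [if_neg h2, if_neg (by push_cast; omega : ¬(0 ≤ z - r0 ∧ z - r0 < ((t+1 : Nat) : Int)))]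
        simp

theorem pvDg_append (n0 : Nat) (rows : List (List Int)) (row : List Int) (i0 c : Int) :
    pvDg n0 (rows ++ [row]) i0 c = pvDg n0 rows i0 c ++ pvCtb n0 (i0 + rows.length) c row := by
  induction rows generalizing i0 with
  | nil => simp [pvDg]
  | cons r rest ih =>
    simp only [List.cons_append, pvDg, ih, List.length_cons, List.append_assoc]
    rw [show i0 + ((rest.length + 1 : Nat) : Int) = i0 + 1 + (rest.length : Int) by push_cast; ring]

theorem pvDg_length_ctb (n0 : Nat) (i0 c : Int) (row : List Int) :
    (pvCtb n0 i0 c row).length = if 0 ≤ i0 - c ∧ i0 - c < (n0:Int) then 1 else 0 := by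
  unfold pvCtb; split <;> simp

-- closed form for the length of a diagonal of the first t rows
theorem pvCnt_closed (n0 : Nat) (mat : List (List Int)) (t : Nat) (c : Int) (ht : t ≤ mat.length) :
    ((pvDg n0 (mat.take t) 0 c).length : Int) = max 0 (min (t : Int) (c + (n0:Int)) - max 0 c) := by
  induction t with
  | zero => simp
  | succ u ih =>
    have hu : u < mat.length := by omega
    have htake : mat.take (u+1) = mat.take u ++ [mat[u]] := by
      rw [← List.take_concat_get hu, List.concat_eq_append]
    rw [htake, pvDg_append, List.length_append, pvDg_length_ctb]
    have := ih (by omega)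
    simp only [List.length_take] at this ⊢
    push_cast
    push_cast at this
    split <;> omega

-- the per-key "sort in place over the keys" pass
theorem pvSortPass (ks : List Int) (hnd : ks.Nodup) (d : PySem.Dict Int (List Int)) (c : Int) :
    ((ks.foldl (fun d k => d.insert k (PySem.List.sorted (d.getD k []) (fun x => x))) d).getD c []) =
      if c ∈ ks then PySem.List.sorted (d.getD c []) (fun x => x) else d.getD c [] := by
  induction ks generalizing d with
  | nil => simp
  | cons k rest ih =>
    simp only [List.foldl_cons]
    rw [ih (by simp_all [List.nodup_cons])]
    by_cases hm : c ∈ rest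
    · rw [if_pos hm, if_pos (by simp [hm])]
      have hne : c ≠ k := by rintro rfl; exact (List.nodup_cons.mp hnd).1 hm
      rw [PySem.Dict.getD_insert, if_neg hne]
    · rw [if_neg hm, PySem.Dict.getD_insert]
      by_cases hck : c = k
      · rw [if_pos hck, if_pos (by simp [hck]), hck]
      · rw [if_neg hck, if_neg (by simp [hck, hm])]

-- initial all-empty dict of A
theorem pvInitDict (zs : List Int) (d : PySem.Dict Int (List Int))
    (h : ∀ z, d.getD z [] = []) (z : Int) :
    (zs.foldl (fun d z => d.insert z ([] : List Int)) d).getD z [] = [] := by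
  induction zs generalizing d with
  | nil => exact h z
  | cons a rest ih =>
    simp only [List.foldl_cons]
    exact ih _ (fun w => by rw [PySem.Dict.getD_insert]; split <;> simp [h])

-- A's append-then-sort step
def pvSortStep (d : PySem.Dict Int (List Int)) (p : Int × Int) : PySem.Dict Int (List Int) :=
  (d.modify p.1 [] (fun t => t ++ [p.2])).modify p.1 [] (fun t => PySem.List.sorted t (fun x => x))

theorem pvSortStep_fold (l : List (Int × Int)) (d : PySem.Dict Int (List Int))
    (hs : ∀ c, PySem.List.sorted (d.getD c []) (fun x => x) = d.getD c []) (c : Int) :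
    (l.foldl pvSortStep d).getD c [] =
      PySem.List.sorted (d.getD c [] ++ (l.filter (fun p => p.1 == c)).map (fun p => p.2)) (fun x => x) := by
  induction l generalizing d with
  | nil => simp [hs]
  | cons p rest ih =>
    simp only [List.foldl_cons]
    have hstep : ∀ w, (pvSortStep d p).getD w [] =
        if w = p.1 then PySem.List.sorted (d.getD p.1 [] ++ [p.2]) (fun x => x) else d.getD w [] := by
      intro w
      simp only [pvSortStep, PySem.Dict.getD_modify]
      by_cases hw : w = p.1
      · simp [hw]
      · simp [hw]
    have hs' : ∀ w, PySem.List.sorted ((pvSortStep d p).getD w []) (fun x => x) = (pvSortStep d p).getD w [] := by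
      intro w
      rw [hstep w]
      split
      · rw [PySem.List.sorted_sorted]
      · exact hs w
    rw [ih _ hs', hstep c]
    by_cases hc : c = p.1
    · rw [if_pos hc, List.filter_cons, if_pos (by simp [hc.symm])]
      simp only [List.map_cons]
      apply PySem.List.sorted_eq_sorted_of_perm _ _ _ (fun a b h => h)
      calc (PySem.List.sorted (d.getD p.1 [] ++ [p.2]) (fun x => x) ++
              (rest.filter (fun q => q.1 == c)).map (fun q => q.2)).Perm
            ((d.getD p.1 [] ++ [p.2]) ++ (rest.filter (fun q => q.1 == c)).map (fun q => q.2)) :=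
          (PySem.List.sorted_perm _ _ _).append_right _
        _ = d.getD c [] ++ p.2 :: (rest.filter (fun q => q.1 == c)).map (fun q => q.2) := by
          rw [hc, List.append_assoc]; rfl
    · rw [if_neg hc, List.filter_cons, if_neg (by simpa using fun h => hc h.symm)]

-- B: the nested grouping loop as a flat fold over (key, value) pairs
def pvPairsB (n0 : Nat) (mat : List (List Int)) : List (Int × Int) :=
  (PySem.List.enumerate mat 0).flatMap
    (fun p => (PySem.List.pyRange 0 (n0 : Int) 1).map (fun j => (p.1 - j, PySem.List.pyGetD p.2 j 0)))

theorem pvB_flat (n0 : Nat) (mat : List (List Int)) :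
    ((PySem.List.enumerate mat 0).foldl
      (fun d p => (PySem.List.pyRange 0 (n0 : Int) 1).foldl
        (fun d j => d.modify (p.1 - j) [] (fun t => t ++ [PySem.List.pyGetD p.2 j 0])) d)
      PySem.Dict.empty)
    = (pvPairsB n0 mat).foldl (fun d p => d.modify p.1 [] (fun t => t ++ [p.2])) PySem.Dict.empty := by
  rw [pvPairsB, List.flatMap_def, List.foldl_flatten, List.foldl_map]
  congr 1
  funext d p
  rw [List.foldl_map]

theorem pvB_diag (n0 : Nat) (mat : List (List Int)) (c : Int) :
    ((pvPairsB n0 mat).filter (fun p => p.1 == c)).map (fun p => p.2) = pvDg n0 mat 0 c := by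
  rw [pvPairsB]
  suffices h : ∀ (rows : List (List Int)) (s : Int),
      (((PySem.List.enumerate rows s).flatMap
        (fun p => (PySem.List.pyRange 0 (n0 : Int) 1).map (fun j => (p.1 - j, PySem.List.pyGetD p.2 j 0)))).filter
          (fun p => p.1 == c)).map (fun p => p.2) = pvDg n0 rows s c by
    exact h mat 0
  intro rows
  induction rows with
  | nil => intro s; simp [PySem.List.enumerate, pvDg]
  | cons row rest ih =>
    intro s
    rw [show PySem.List.enumerate (row :: rest) s = (s, row) :: PySem.List.enumerate rest (s+1) by
      simp [PySem.List.enumerate]]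
    rw [List.flatMap_cons, List.filter_append, List.map_append, ih (s+1)]
    rw [pvDg]
    congr 1
    exact pvRF_B n0 s c row

theorem pvSetRow (t : Nat) (row : List Int) (w : Int → Int) (ht : t ≤ row.length) :
    (PySem.List.pyRange 0 (t : Int) 1).foldl (fun r j => PySem.List.pySetD r j (w j)) row
      = (List.range t).map (fun (l : Nat) => w (l : Int)) ++ row.drop t := by
  induction t with
  | zero => simp
  | succ u ih =>
    rw [show ((u + 1 : Nat) : Int) = (u : Int) + 1 by push_cast; ring,
      PySem.List.pyRange_one_succ_right (by positivity), List.foldl_append]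
    rw [ih (by omega)]
    simp only [List.foldl_cons, List.foldl_nil]
    rw [PySem.List.pySetD_natCast, List.set_append, if_neg (by simp)]
    simp only [List.range_succ, List.map_append]
    simp only [List.append_assoc]
    congr 1
    rw [show u - (List.map (fun (l:Nat) => w (l:Int)) (List.range u)).length = 0 by simp]
    rw [List.drop_eq_getElem_cons (by omega : u < row.length), List.set_cons_zero]
    simp


-- A pass 1: one row of append-then-sort steps
theorem pvA_row (t : Nat) (row : List Int) (d : PySem.Dict Int (List Int)) (r0 : Int) :
    (PySem.List.pyRange 0 (t : Int) 1).foldl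
      (fun (s : PySem.Dict Int (List Int) × Int) l =>
        ((s.1.modify s.2 [] (fun u => u ++ [PySem.List.pyGetD row l 0])).modify s.2 []
          (fun u => PySem.List.sorted u (fun x => x)), s.2 + 1)) (d, r0)
    = ((pvRowPairsA row r0 t).foldl pvSortStep d, r0 + t) := by
  induction t with
  | zero => simp [pvRowPairsA]
  | succ u ih =>
    rw [show ((u + 1 : Nat) : Int) = (u : Int) + 1 by push_cast; ring,
      PySem.List.pyRange_one_succ_right (by positivity), List.foldl_append, ih]
    rw [show pvRowPairsA row r0 (u+1) = pvRowPairsA row r0 u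
          ++ [(r0 + (u:Int), PySem.List.pyGetD row (u:Int) 0)] by
        rw [pvRowPairsA, List.range_succ, List.map_append]; rfl]
    rw [List.foldl_append]
    simp only [List.foldl_cons, List.foldl_nil]
    exact Prod.ext_iff.mpr ⟨rfl, by push_cast; ring⟩

-- A pass 1: the cells visited from row kk down to row 0, with running start key r0
def pvCellsA (mat : List (List Int)) (n0 : Nat) : Nat → Int → List (Int × Int)
  | 0, r0 => pvRowPairsA (PySem.List.pyGetD mat 0 []) r0 n0
  | (k+1), r0 => pvRowPairsA (PySem.List.pyGetD mat ((k+1 : Nat) : Int) []) r0 n0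
      ++ pvCellsA mat n0 k (r0 + 1)

theorem pvA_pass1 (mat : List (List Int)) (n0 : Nat) (kk : Nat) (d : PySem.Dict Int (List Int)) (r0 : Int) :
    (PySem.List.pyRange (kk : Int) (-1) (-1)).foldl
      (fun (s : PySem.Dict Int (List Int) × Int) k =>
        let s := (PySem.List.pyRange 0 (n0 : Int) 1).foldl
          (fun (s : PySem.Dict Int (List Int) × Int) l =>
            let d := s.1.modify s.2 [] (fun u => u ++ [PySem.List.pyGetD (PySem.List.pyGetD mat k []) l 0])
            let d := d.modify s.2 [] (fun u => PySem.List.sorted u (fun x => x))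
            (d, s.2 + 1)) s
        (s.1, s.2 - ((n0 : Int) - 1))) (d, r0)
    = ((pvCellsA mat n0 kk r0).foldl pvSortStep d, r0 + kk + 1) := by
  induction kk generalizing d r0 with
  | zero =>
    rw [PySem.List.pyRange_neg_one_cons (by omega), PySem.List.pyRange_neg_one_eq_nil (by omega)]
    simp only [List.foldl_cons, List.foldl_nil, Nat.cast_zero]
    rw [pvA_row n0 (PySem.List.pyGetD mat 0 []) d r0]
    rw [pvCellsA]
    exact Prod.ext_iff.mpr ⟨rfl, by push_cast; ring⟩
  | succ u ih =>
    rw [PySem.List.pyRange_neg_one_cons (by omega),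
      show ((u + 1 : Nat) : Int) - 1 = (u : Int) by push_cast; ring]
    simp only [List.foldl_cons]
    rw [pvA_row n0 (PySem.List.pyGetD mat ((u+1 : Nat) : Int) []) d r0]
    rw [ih]
    simp only []
    rw [show r0 + (n0 : Int) - ((n0 : Int) - 1) = r0 + 1 from by ring]
    rw [pvCellsA, List.foldl_append]
    exact Prod.ext_iff.mpr ⟨rfl, by push_cast; ring⟩

-- A pass 1: the visited cells of one diagonal are the row-major diagonal, reversed
theorem pvA_cells_filter (mat : List (List Int)) (n0 : Nat) (kk : Nat) (hkk : kk < mat.length) :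
    ∀ (r0 z : Int),
    ((pvCellsA mat n0 kk r0).filter (fun p => p.1 == z)).map (fun p => p.2)
    = (pvDg n0 (mat.take (kk+1)) 0 (r0 + kk - z)).reverse := by
  induction kk with
  | zero =>
    intro r0 z
    simp only [Nat.cast_zero]
    rw [pvCellsA, pvRF_A]
    rw [show mat.take 1 = [mat[0]'hkk] by
      rw [← List.take_concat_get hkk, List.concat_eq_append]; simp]
    rw [show PySem.List.pyGetD mat 0 [] = mat[0]'hkk by
      rw [show (0 : Int) = ((0 : Nat) : Int) by simp, PySem.List.pyGetD_natCast]
      simp [List.getD_eq_getElem?_getD, List.getElem?_eq_getElem hkk]]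
    rw [pvDg, pvDg, pvCtb]
    by_cases hc : 0 ≤ z - r0 ∧ z - r0 < (n0 : Int)
    · rw [if_pos hc, if_pos (by omega : 0 ≤ 0 - (r0 + 0 - z) ∧ 0 - (r0 + 0 - z) < (n0:Int)),
        show 0 - (r0 + 0 - z) = z - r0 by ring]
      simp
    · rw [if_neg hc, if_neg (by omega : ¬(0 ≤ 0 - (r0 + 0 - z) ∧ 0 - (r0 + 0 - z) < (n0:Int)))]
      simp
  | succ u ih =>
    intro r0 z
    have hu : u < mat.length := by omega
    rw [pvCellsA, List.filter_append, List.map_append, pvRF_A, ih hu (r0 + 1) z]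
    rw [show mat.take (u+2) = mat.take (u+1) ++ [mat[u+1]'hkk] by
      rw [← List.take_concat_get hkk, List.concat_eq_append]]
    rw [pvDg_append, List.reverse_append]
    have hlen : ((mat.take (u+1)).length : Int) = ((u+1 : Nat) : Int) := by
      simp [List.length_take]; omega
    rw [show (0 : Int) + ((mat.take (u+1)).length : Int) = ((u+1 : Nat) : Int) by rw [hlen]; ring]
    rw [show PySem.List.pyGetD mat ((u+1 : Nat) : Int) [] = mat[u+1]'hkk by
      rw [PySem.List.pyGetD_natCast]
      simp [List.getD_eq_getElem?_getD, List.getElem?_eq_getElem hkk]]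
    rw [show r0 + 1 + (u : Int) - z = r0 + ((u+1 : Nat) : Int) - z by push_cast; ring]
    congr 1
    rw [pvCtb]
    by_cases hc : 0 ≤ z - r0 ∧ z - r0 < (n0 : Int)
    · rw [if_pos hc,
        if_pos (by push_cast; omega :
          0 ≤ ((u+1:Nat):Int) - (r0 + ((u+1:Nat):Int) - z) ∧ ((u+1:Nat):Int) - (r0 + ((u+1:Nat):Int) - z) < (n0:Int)),
        show ((u+1:Nat):Int) - (r0 + ((u+1:Nat):Int) - z) = z - r0 by ring]
      simp
    · rw [if_neg hc,
        if_neg (by push_cast; omega :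
          ¬(0 ≤ ((u+1:Nat):Int) - (r0 + ((u+1:Nat):Int) - z) ∧ ((u+1:Nat):Int) - (r0 + ((u+1:Nat):Int) - z) < (n0:Int)))]
      simp

-- B: the sorted-diagonal dict looks up to pvS
theorem pvB_dict (n0 : Nat) (mat : List (List Int)) (c : Int) :
    ((((PySem.List.enumerate mat 0).foldl
        (fun d p => (PySem.List.pyRange 0 (n0 : Int) 1).foldl
          (fun d j => d.modify (p.1 - j) [] (fun t => t ++ [PySem.List.pyGetD p.2 j 0])) d)
        PySem.Dict.empty).keys.foldl
          (fun d k => d.insert k (PySem.List.sorted (d.getD k []) (fun x => x)))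
          ((PySem.List.enumerate mat 0).foldl
            (fun d p => (PySem.List.pyRange 0 (n0 : Int) 1).foldl
              (fun d j => d.modify (p.1 - j) [] (fun t => t ++ [PySem.List.pyGetD p.2 j 0])) d)
            PySem.Dict.empty)).getD c []) = pvS mat n0 c := by
  rw [pvB_flat]
  set d1 := (pvPairsB n0 mat).foldl (fun d p => d.modify p.1 [] (fun t => t ++ [p.2]))
    PySem.Dict.empty with hd1
  have hget : ∀ w, d1.getD w [] = pvDg n0 mat 0 w := by
    intro w
    rw [hd1, PySem.Dict.getD_foldl_modify_append, PySem.Dict.getD_empty, List.nil_append,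
      pvB_diag]
  have hnd : d1.keys.Nodup := by
    rw [hd1]
    exact PySem.Dict.nodup_keys_foldl_modify_key (pvPairsB n0 mat) (fun p => p.1) []
      (fun d p => fun t => t ++ [p.2]) PySem.Dict.empty (by simp [PySem.Dict.empty, PySem.Dict.keys])
  rw [pvSortPass d1.keys hnd d1 c]
  by_cases hm : c ∈ d1.keys
  · rw [if_pos hm, hget, pvS]
  · rw [if_neg hm]
    have h0 : d1.getD c [] = [] := by
      apply PySem.Dict.getD_of_not_contains
      rw [← Bool.not_eq_true, PySem.Dict.contains_iff_mem_keys]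
      exact hm
    rw [h0, pvS, ← hget, h0]
    simp [PySem.List.sorted]

-- B: full characterisation of diagonalSort_alt
theorem pvB_char (mat : List (List Int)) (h1 : mat ≠ [])
    (h2 : ∀ row ∈ mat, (mat.headD []).length ≤ row.length) :
    diagonalSort_alt mat = (List.range mat.length).map
      (fun (k : Nat) => (List.range (mat.headD []).length).map
        (fun (l : Nat) => pvW mat (mat.headD []).length (k : Int) l)
        ++ (mat.getD k []).drop (mat.headD []).length) := by
  obtain ⟨r, rest, rfl⟩ : ∃ r rest, mat = r :: rest := by
    cases mat with
    | nil => exact absurd rfl h1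
    | cons r rest => exact ⟨r, rest, rfl⟩
  set n0 : Nat := ((r :: rest).headD []).length with hn0
  have hn : PySem.List.pyGetD (r :: rest) 0 [] = r := by
    simp [PySem.List.pyGetD_zero_cons]
  rw [diagonalSort_alt]
  simp only [hn]
  simp only [pvB_dict r.length (r :: rest)]
  rw [List.map_congr_left (g := fun (p : Int × List Int) =>
      (List.range r.length).map (fun (l : Nat) => pvW (r :: rest) r.length p.1 l) ++ p.2.drop r.length)
    (by
      intro p hp
      obtain ⟨k, hk, rfl⟩ := (PySem.List.mem_enumerate_iff _ _ _).mp hp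
      exact pvSetRow r.length _ _ (h2 _ (by simp [List.getElem_mem])))]
  rw [PySem.List.enumerate_eq_map_pyRange (r :: rest) ([] : List Int)]
  simp only [PySem.List.len_eq, PySem.List.pyRange_zero_natCast, List.map_map]
  apply List.map_congr_left
  intro k hk
  simp only [hn0, List.headD_cons]
  simp [PySem.List.pyGetD_natCast]

-- number of cells of diagonal c among the first t rows
def pvCnt (n0 : Nat) (mat : List (List Int)) (t : Nat) (c : Int) : Nat :=
  (pvDg n0 (mat.take t) 0 c).length

theorem pvCnt_closed' (n0 : Nat) (mat : List (List Int)) (t : Nat) (c : Int) (ht : t ≤ mat.length) :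
    (pvCnt n0 mat t c : Int) = max 0 (min (t : Int) (c + (n0 : Int)) - max 0 c) :=
  pvCnt_closed n0 mat t c ht

theorem pvCnt_full (n0 : Nat) (mat : List (List Int)) (c : Int) :
    (pvS mat n0 c).length = pvCnt n0 mat mat.length c := by
  rw [pvS, PySem.List.length_sorted, pvCnt, List.take_length]

-- pass 2 helper: the value written at cell (kk, t)
theorem pvW_eq_getElem (mat : List (List Int)) (n0 : Nat) (kk t : Nat)
    (h : min kk t < (pvS mat n0 ((kk : Int) - (t : Int))).length) :
    pvW mat n0 (kk : Int) t = (pvS mat n0 ((kk : Int) - (t : Int)))[min kk t]'h := by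
  rw [pvW, ← Nat.cast_min, PySem.List.pyGetD_natCast, List.getD_eq_getElem?_getD,
    List.getElem?_eq_getElem h]
  rfl

-- A pass 2, one row: pops write the sorted values into row kk, keys advance
theorem pvA_row2 (mat : List (List Int)) (n0 : Nat) (kk : Nat) (hkk : kk < mat.length)
    (macc : List (List Int)) (hmlen : macc.length = mat.length)
    (row : List Int) (hrow : macc[kk]? = some row)
    (hrl : n0 ≤ row.length)
    (d : PySem.Dict Int (List Int))
    (hd : ∀ z : Int, d.getD z [] =
      (pvS mat n0 ((mat.length : Int) - 1 - z)).take (pvCnt n0 mat (kk+1) ((mat.length : Int) - 1 - z)))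
    (t : Nat) (ht : t ≤ n0) :
    ((PySem.List.pyRange 0 (t : Int) 1).foldl
      (fun (s : List (List Int) × PySem.Dict Int (List Int) × Int) l =>
        (PySem.List.pySetD s.1 (kk : Int) (PySem.List.pySetD (PySem.List.pyGetD s.1 (kk : Int) []) l
            (((PySem.List.pop? (s.2.1.getD s.2.2 []) (-1)).getD (0, [])).1)),
          s.2.1.insert s.2.2 (((PySem.List.pop? (s.2.1.getD s.2.2 []) (-1)).getD (0, [])).2),
          s.2.2 + 1))
      (macc, d, (mat.length : Int) - 1 - (kk : Int)))
    = ((PySem.List.pySetD macc (kk : Int)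
          ((List.range t).map (fun (l : Nat) => pvW mat n0 (kk : Int) l) ++ row.drop t)),
        ((PySem.List.pyRange 0 (t : Int) 1).foldl
          (fun (s : List (List Int) × PySem.Dict Int (List Int) × Int) l =>
            (PySem.List.pySetD s.1 (kk : Int) (PySem.List.pySetD (PySem.List.pyGetD s.1 (kk : Int) []) l
                (((PySem.List.pop? (s.2.1.getD s.2.2 []) (-1)).getD (0, [])).1)),
              s.2.1.insert s.2.2 (((PySem.List.pop? (s.2.1.getD s.2.2 []) (-1)).getD (0, [])).2),
              s.2.2 + 1))
          (macc, d, (mat.length : Int) - 1 - (kk : Int))).2.1,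
        (mat.length : Int) - 1 - (kk : Int) + t)
    ∧ ∀ z : Int,
      ((PySem.List.pyRange 0 (t : Int) 1).foldl
          (fun (s : List (List Int) × PySem.Dict Int (List Int) × Int) l =>
            (PySem.List.pySetD s.1 (kk : Int) (PySem.List.pySetD (PySem.List.pyGetD s.1 (kk : Int) []) l
                (((PySem.List.pop? (s.2.1.getD s.2.2 []) (-1)).getD (0, [])).1)),
              s.2.1.insert s.2.2 (((PySem.List.pop? (s.2.1.getD s.2.2 []) (-1)).getD (0, [])).2),
              s.2.2 + 1))
          (macc, d, (mat.length : Int) - 1 - (kk : Int))).2.1.getD z []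
      = if (mat.length : Int) - 1 - (kk : Int) ≤ z ∧ z < (mat.length : Int) - 1 - (kk : Int) + t
        then (pvS mat n0 ((mat.length : Int) - 1 - z)).take (pvCnt n0 mat kk ((mat.length : Int) - 1 - z))
        else d.getD z [] := by
  have hkk' : kk < macc.length := by omega
  induction t with
  | zero =>
    simp only [Nat.cast_zero, PySem.List.pyRange_zero, Int.toNat_zero, List.range_zero,
      List.map_nil, List.foldl_nil]
    refine ⟨?_, ?_⟩
    · have hset : PySem.List.pySetD macc (kk : Int) row = macc := by
        rw [PySem.List.pySetD_natCast]
        have : row = macc[kk]'hkk' := by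
          have := hrow; rw [List.getElem?_eq_getElem hkk'] at this; exact (Option.some_inj.mp this).symm
        rw [this, List.set_getElem_self]
      simp only [List.range_zero, List.map_nil, List.drop_zero, List.nil_append, hset]
      exact Prod.ext_iff.mpr ⟨rfl, Prod.ext_iff.mpr ⟨rfl, by ring⟩⟩
    · intro z
      rw [if_neg (by omega)]
  | succ t ih =>
    obtain ⟨ihF, ihD⟩ := ih (by omega)
    rw [show ((t + 1 : Nat) : Int) = (t : Int) + 1 by push_cast; ring,
      PySem.List.pyRange_one_succ_right (by positivity), List.foldl_append] at *
    simp only [List.foldl_cons, List.foldl_nil]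
    -- the state after t steps
    rw [ihF]
    simp only []
    -- the popped list
    have hz0 : ¬ ((mat.length : Int) - 1 - (kk : Int) ≤ ((mat.length : Int) - 1 - (kk : Int) + t) ∧
        ((mat.length : Int) - 1 - (kk : Int) + t) < (mat.length : Int) - 1 - (kk : Int) + t) := by omega
    have hc0 : (mat.length : Int) - 1 - ((mat.length : Int) - 1 - (kk : Int) + t) = (kk : Int) - (t : Int) := by ring
    have hgd : d.getD ((mat.length : Int) - 1 - (kk : Int) + t) [] =
        (pvS mat n0 ((kk : Int) - (t : Int))).take (pvCnt n0 mat (kk+1) ((kk : Int) - (t : Int))) := by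
      rw [hd, hc0]
    have hcnt1 : pvCnt n0 mat (kk+1) ((kk : Int) - (t : Int)) = min kk t + 1 := by
      have h1 := pvCnt_closed' n0 mat (kk+1) ((kk : Int) - (t : Int)) (by omega)
      omega
    have hcntk : pvCnt n0 mat kk ((kk : Int) - (t : Int)) = min kk t := by
      have h1 := pvCnt_closed' n0 mat kk ((kk : Int) - (t : Int)) (by omega)
      omega
    have hSlen : min kk t < (pvS mat n0 ((kk : Int) - (t : Int))).length := by
      rw [pvCnt_full]
      have h1 := pvCnt_closed' n0 mat mat.length ((kk : Int) - (t : Int)) (by omega)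
      omega
    have hpop : (PySem.List.pop?
        ((pvS mat n0 ((kk : Int) - (t : Int))).take (pvCnt n0 mat (kk+1) ((kk : Int) - (t : Int)))) (-1)).getD (0, [])
        = ((pvS mat n0 ((kk : Int) - (t : Int)))[min kk t]'hSlen,
            (pvS mat n0 ((kk : Int) - (t : Int))).take (min kk t)) := by
      rw [hcnt1, List.take_succ, List.getElem?_eq_getElem hSlen]
      simp only [Option.toList_some]
      rw [PySem.List.pop?_last]
      rfl
    have htn : t < n0 := by omega
    have htrow : t < row.length := by omega
    refine ⟨?_, ?_⟩
    · rw [ihD, if_neg hz0, hgd, hpop]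
      simp only []
      refine Prod.ext_iff.mpr ⟨?_, Prod.ext_iff.mpr ⟨rfl, by push_cast; ring⟩⟩
      rw [PySem.List.pyGetD_pySetD_natCast macc kk kk _ [] (by omega), if_pos rfl]
      simp only [PySem.List.pySetD_natCast]
      rw [List.set_set]
      congr 1
      rw [List.set_append, if_neg (by simp)]
      rw [show t - (List.map (fun (l : Nat) => pvW mat n0 (kk : Int) l) (List.range t)).length = 0 by
        simp]
      rw [List.drop_eq_getElem_cons htrow, List.set_cons_zero]
      rw [List.range_succ, List.map_append, List.append_assoc]
      simp only [List.map_cons, List.map_nil]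
      rw [pvW_eq_getElem mat n0 kk t hSlen]
      rw [List.singleton_append]
    · intro z
      rw [ihD, if_neg hz0, hgd, hpop]
      simp only []
      rw [PySem.Dict.getD_insert]
      by_cases hz : z = (mat.length : Int) - 1 - (kk : Int) + (t : Int)
      · rw [if_pos hz, if_pos (by omega), hz, hc0, hcntk]
      · rw [if_neg hz, ihD]
        by_cases hw : (mat.length : Int) - 1 - (kk : Int) ≤ z ∧ z < (mat.length : Int) - 1 - (kk : Int) + (t : Int)
        · rw [if_pos hw, if_pos (by push_cast; omega)]
        · rw [if_neg hw, if_neg (by push_cast; omega)]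
theorem pvCnt_succ_out (n0 : Nat) (mat : List (List Int)) (kk : Nat) (hkk : kk < mat.length)
    (c : Int) (h : ¬ (0 ≤ (kk : Int) - c ∧ (kk : Int) - c < (n0 : Int))) :
    pvCnt n0 mat (kk+1) c = pvCnt n0 mat kk c := by
  have h1 := pvCnt_closed' n0 mat (kk+1) c (by omega)
  have h2 := pvCnt_closed' n0 mat kk c (by omega)
  omega

-- A pass 2, rows kk down to 0
theorem pvA_pass2 (mat : List (List Int)) (n0 : Nat)
    (hrows : ∀ row ∈ mat, n0 ≤ row.length)
    (kk : Nat) (hkk : kk < mat.length) (macc : List (List Int)) (d : PySem.Dict Int (List Int))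
    (hmlen : macc.length = mat.length)
    (hagree : ∀ k : Nat, k ≤ kk → macc[k]? = mat[k]?)
    (hd : ∀ z : Int, d.getD z [] =
      (pvS mat n0 ((mat.length : Int) - 1 - z)).take (pvCnt n0 mat (kk+1) ((mat.length : Int) - 1 - z)))
    (j : Nat) :
    ((PySem.List.pyRange (kk : Int) (-1) (-1)).foldl
      (fun (s : List (List Int) × PySem.Dict Int (List Int) × Int) k =>
        (((PySem.List.pyRange 0 (n0 : Int) 1).foldl
          (fun (s : List (List Int) × PySem.Dict Int (List Int) × Int) l =>
            (PySem.List.pySetD s.1 k (PySem.List.pySetD (PySem.List.pyGetD s.1 k []) l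
                (((PySem.List.pop? (s.2.1.getD s.2.2 []) (-1)).getD (0, [])).1)),
              s.2.1.insert s.2.2 (((PySem.List.pop? (s.2.1.getD s.2.2 []) (-1)).getD (0, [])).2),
              s.2.2 + 1)) s).1,
         ((PySem.List.pyRange 0 (n0 : Int) 1).foldl
          (fun (s : List (List Int) × PySem.Dict Int (List Int) × Int) l =>
            (PySem.List.pySetD s.1 k (PySem.List.pySetD (PySem.List.pyGetD s.1 k []) l
                (((PySem.List.pop? (s.2.1.getD s.2.2 []) (-1)).getD (0, [])).1)),
              s.2.1.insert s.2.2 (((PySem.List.pop? (s.2.1.getD s.2.2 []) (-1)).getD (0, [])).2),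
              s.2.2 + 1)) s).2.1,
         ((PySem.List.pyRange 0 (n0 : Int) 1).foldl
          (fun (s : List (List Int) × PySem.Dict Int (List Int) × Int) l =>
            (PySem.List.pySetD s.1 k (PySem.List.pySetD (PySem.List.pyGetD s.1 k []) l
                (((PySem.List.pop? (s.2.1.getD s.2.2 []) (-1)).getD (0, [])).1)),
              s.2.1.insert s.2.2 (((PySem.List.pop? (s.2.1.getD s.2.2 []) (-1)).getD (0, [])).2),
              s.2.2 + 1)) s).2.2 - ((n0 : Int) - 1)))
      (macc, d, (mat.length : Int) - 1 - (kk : Int))).1[j]?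
    = if j ≤ kk
      then (mat[j]?).map (fun row =>
        (List.range n0).map (fun (l : Nat) => pvW mat n0 (j : Int) l) ++ row.drop n0)
      else macc[j]? := by
  induction kk generalizing macc d with
  | zero =>
    rw [PySem.List.pyRange_neg_one_cons (by omega), PySem.List.pyRange_neg_one_eq_nil (by omega)]
    simp only [List.foldl_cons, List.foldl_nil]
    have h0m : 0 < mat.length := hkk
    have hrow : macc[0]? = some (mat[0]'h0m) := by
      rw [hagree 0 le_rfl, List.getElem?_eq_getElem h0m]
    have hF := pvA_row2 mat n0 0 h0m macc hmlen (mat[0]'h0m) hrow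
      (hrows _ (List.getElem_mem _)) d hd n0 le_rfl
    rw [hF.1]
    simp only []
    rw [PySem.List.pySetD_natCast]
    by_cases hj : j = 0
    · subst hj
      rw [List.getElem?_set_self (by omega), if_pos le_rfl, List.getElem?_eq_getElem h0m]
      rfl
    · rw [List.getElem?_set_ne (by omega), if_neg (by omega)]
  | succ u ih =>
    rw [PySem.List.pyRange_neg_one_cons (by omega),
      show ((u + 1 : Nat) : Int) - 1 = (u : Int) by push_cast; ring]
    simp only [List.foldl_cons]
    have hu1 : u + 1 < mat.length := hkk
    have hrow : macc[u+1]? = some (mat[u+1]'hu1) := by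
      rw [hagree (u+1) le_rfl, List.getElem?_eq_getElem hu1]
    have hF := pvA_row2 mat n0 (u+1) hu1 macc hmlen (mat[u+1]'hu1) hrow
      (hrows _ (List.getElem_mem _)) d hd n0 le_rfl
    rw [hF.1]
    simp only []
    rw [show (mat.length : Int) - 1 - ((u+1 : Nat) : Int) + (n0 : Int) - ((n0 : Int) - 1)
        = (mat.length : Int) - 1 - (u : Int) from by push_cast; ring]
    rw [ih (by omega) (PySem.List.pySetD macc ((u+1 : Nat) : Int)
        ((List.range n0).map (fun (l : Nat) => pvW mat n0 ((u+1 : Nat) : Int) l)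
          ++ (mat[u+1]'hu1).drop n0)) _
      (by rw [PySem.List.pySetD_natCast]; simpa using hmlen)
      (by
        intro k hk
        rw [PySem.List.pySetD_natCast, List.getElem?_set_ne (by omega)]
        exact hagree k (by omega))
      (by
        intro z
        rw [hF.2 z]
        by_cases hw : (mat.length : Int) - 1 - ((u+1 : Nat) : Int) ≤ z ∧
            z < (mat.length : Int) - 1 - ((u+1 : Nat) : Int) + (n0 : Int)
        · rw [if_pos hw]
        · rw [if_neg hw, hd z, pvCnt_succ_out n0 mat (u+1) hu1 _ (by push_cast at hw ⊢; omega)])]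
    by_cases hj : j ≤ u
    · rw [if_pos hj, if_pos (by omega)]
    · rw [if_neg hj]
      by_cases hj2 : j = u + 1
      · subst hj2
        rw [if_pos le_rfl, PySem.List.pySetD_natCast,
          List.getElem?_set_self (by omega), List.getElem?_eq_getElem hu1]
        rfl
      · rw [if_neg (by omega), PySem.List.pySetD_natCast, List.getElem?_set_ne (by omega)]

-- zeta-reduced restatement of pvA_pass1 (the form the unfolded port shows)
theorem pvA_pass1' (mat : List (List Int)) (n0 : Nat) (kk : Nat) (d : PySem.Dict Int (List Int)) (r0 : Int) :
    (PySem.List.pyRange (kk : Int) (-1) (-1)).foldl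
      (fun (s : PySem.Dict Int (List Int) × Int) k =>
        (((PySem.List.pyRange 0 (n0 : Int) 1).foldl
          (fun (s : PySem.Dict Int (List Int) × Int) l =>
            ((s.1.modify s.2 [] (fun u => u ++ [PySem.List.pyGetD (PySem.List.pyGetD mat k []) l 0])).modify s.2 []
              (fun u => PySem.List.sorted u (fun x => x)), s.2 + 1)) s).1,
         ((PySem.List.pyRange 0 (n0 : Int) 1).foldl
          (fun (s : PySem.Dict Int (List Int) × Int) l =>
            ((s.1.modify s.2 [] (fun u => u ++ [PySem.List.pyGetD (PySem.List.pyGetD mat k []) l 0])).modify s.2 []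
              (fun u => PySem.List.sorted u (fun x => x)), s.2 + 1)) s).2 - ((n0 : Int) - 1)))
      (d, r0)
    = ((pvCellsA mat n0 kk r0).foldl pvSortStep d, r0 + kk + 1) := pvA_pass1 mat n0 kk d r0

-- A: full characterisation of diagonalSort, entry by entry
theorem pvA_char (mat : List (List Int)) (h1 : mat ≠ [])
    (h2 : ∀ row ∈ mat, (mat.headD []).length ≤ row.length) (j : Nat) :
    (diagonalSort mat)[j]? = (mat[j]?).map (fun row =>
      (List.range (mat.headD []).length).map
        (fun (l : Nat) => pvW mat (mat.headD []).length (j : Int) l)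
      ++ row.drop (mat.headD []).length) := by
  obtain ⟨r, rest, rfl⟩ : ∃ r rest, mat = r :: rest := by
    cases mat with
    | nil => exact absurd rfl h1
    | cons r rest => exact ⟨r, rest, rfl⟩
  have hn : PySem.List.pyGetD (r :: rest) 0 [] = r := by
    simp [PySem.List.pyGetD_zero_cons]
  simp only [diagonalSort, hn, List.headD_cons]
  rw [show ((r :: rest).length : Int) - 1 = ((rest.length : Nat) : Int) from by push_cast; simp]
  rw [pvA_pass1']
  simp only []
  have hd : ∀ z : Int,
      ((pvCellsA (r :: rest) r.length rest.length 0).foldl pvSortStep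
        ((PySem.List.pyRange 0 (((r :: rest).length : Int) + (r.length : Int) - 1) 1).foldl
          (fun d z => d.insert z ([] : List Int)) PySem.Dict.empty)).getD z []
      = (pvS (r :: rest) r.length (((r :: rest).length : Int) - 1 - z)).take
          (pvCnt r.length (r :: rest) (rest.length + 1) (((r :: rest).length : Int) - 1 - z)) := by
    intro z
    have hd0 : ∀ w : Int, ((PySem.List.pyRange 0 (((r :: rest).length : Int) + (r.length : Int) - 1) 1).foldl
        (fun d z => d.insert z ([] : List Int)) PySem.Dict.empty).getD w [] = [] :=
      pvInitDict _ PySem.Dict.empty (fun w => PySem.Dict.getD_empty w [])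
    have hs0 : ∀ c : Int, PySem.List.sorted
        (((PySem.List.pyRange 0 (((r :: rest).length : Int) + (r.length : Int) - 1) 1).foldl
          (fun d z => d.insert z ([] : List Int)) PySem.Dict.empty).getD c []) (fun x => x)
        = ((PySem.List.pyRange 0 (((r :: rest).length : Int) + (r.length : Int) - 1) 1).foldl
          (fun d z => d.insert z ([] : List Int)) PySem.Dict.empty).getD c [] := by
      intro c; rw [hd0 c]; rfl
    rw [pvSortStep_fold _ _ hs0 z, hd0 z, List.nil_append,
      pvA_cells_filter (r :: rest) r.length rest.length (by simp) 0 z]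
    rw [show (r :: rest).take (rest.length + 1) = r :: rest from by
      rw [show rest.length + 1 = (r :: rest).length from rfl, List.take_length]]
    rw [show (0 : Int) + (rest.length : Int) - z = ((r :: rest).length : Int) - 1 - z from by
      simp only [List.length_cons]; push_cast; ring]
    rw [PySem.List.sorted_eq_sorted_of_perm _ _ _ (fun a b h => h)
      (List.reverse_perm _), ← pvS]
    rw [show rest.length + 1 = (r :: rest).length from rfl, ← pvCnt_full, List.take_length]
  have hp2 := pvA_pass2 (r :: rest) r.length (by simpa using h2) rest.length (by simp)
    (r :: rest) _ rfl (fun k _ => rfl) hd j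
  rw [show ((r :: rest).length : Int) - 1 - ((rest.length : Nat) : Int) = 0 from by
    push_cast; simp] at hp2
  rw [hp2]
  by_cases hj : j ≤ rest.length
  · rw [if_pos hj]
  · rw [if_neg hj, List.getElem?_eq_none (by simp; omega)]
    rfl

-- ===== VERDICT (by name: the statement is the Claim_ definition above) =====
theorem diagonalSort_spec : Claim_equal_diagonalSort := by
  intro mat _hdom hpre
  obtain ⟨h1, h2⟩ := hpre
  unfold Spec_diagonalSort
  apply List.ext_getElem?
  intro j
  rw [pvA_char mat h1 h2 j, pvB_char mat h1 h2]
  rw [List.getElem?_map]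
  by_cases hj : j < mat.length
  · rw [List.getElem?_range hj, List.getElem?_eq_getElem hj]
    simp only [Option.map_some]
    congr 1
    rw [List.getD_eq_getElem?_getD, List.getElem?_eq_getElem hj]
    rfl
  · rw [List.getElem?_eq_none (by omega : mat.length ≤ j),
      List.getElem?_eq_none (by simpa using hj)]
    rfl
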